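-- pv_equiv track=rewrite | github.com/pypi-data/pypi-mirror-367 | packages/pgmap/pgmap-1.1.0-py3-none-any.whl/pgmap/alignment/grna_cached_aligner.py | construct_grna_error_alignment_cache
-- ===== SOURCE A (Python) =====
-- import itertools
-- from typing import Iterable
--
-- def construct_grna_error_alignment_cache(
--     gRNAs: Iterable[str], gRNA_error_tolerance: int
-- ) -> dict[str, tuple[str, int]]:
--     """
--     Construct an alignment cache object containing all gRNAs with the error tolerance amount of substitutions. The
--     number of gRNAs within the error tolerance grows exponentially. As such this function should only be used for
--     error tolerances of 0, 1, or 2.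
--
--     Args:
--         gRNAs (Iterable[str]): An iterable producing all the gRNAs to construct the alignment cache from.
--         gRNA_error_tolerance (int): The error tolerance used to create gRNA alignment candidates.
--
--     Returns:
--         alignment_cache (dict[str, tuple[str, int]]): A mapping from each valid alignment string to a tuple of the
--         reference alignment sequence and the hamming distance from the reference. Guarantees a minimum alignment,
--         though there could be multiple best alignments depending on the gRNAs.
--
--     Raises:
--         ValueError: if gRNA_error_tolerance is not 0, 1, or 2.
--     """
--
--     if gRNA_error_tolerance > 2 or gRNA_error_tolerance < 0:
--         raise ValueError(
--             "gRNA error tolerance must be 0, 1, or 2 but was "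
--             + str(gRNA_error_tolerance)
--         )
--
--     alignment_cache = {}
--
--     if gRNA_error_tolerance:
--         for gRNA in gRNAs:
--             # go from high subs to low subs to prefer better alignments
--             for num_substitutions in reversed(range(1, gRNA_error_tolerance + 1)):
--                 alignment_cache.update(
--                     {
--                         mutation: (gRNA, num_substitutions)
--                         for mutation in _get_mutations(gRNA, num_substitutions)
--                     }
--                 )
--
--     alignment_cache.update(
--         {gRNA: (gRNA, 0) for gRNA in gRNAs}
--     )  # prefer perfect alignments
--
--     return alignment_cache
--
-- def _get_mutations(gRNA: str, num_substitutions: int) -> Iterable[str]: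
--     for substitution_indices in _get_all_substitution_indices(gRNA, num_substitutions):
--         yield from _generate_substitutions(gRNA, substitution_indices)
--
-- def _get_all_substitution_indices(
--     gRNA: str, num_substitutions: int
-- ) -> Iterable[tuple[int]]:
--     yield from itertools.combinations(range(len(gRNA)), num_substitutions)
--
-- def _generate_substitutions(
--     gRNA: str, substitution_indices: Iterable[int]
-- ) -> Iterable[str]:
--     for substitutions in itertools.product("ATCG", repeat=len(substitution_indices)):
--         if any(
--             gRNA[i] == substitution
--             for i, substitution in zip(substitution_indices, substitutions)
--         ):
--             continue
--
--         bases = list(gRNA)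
--
--         for i, substitution in zip(substitution_indices, substitutions):
--             bases[i] = substitution
--
--         yield "".join(bases)
-- ===== SOURCE B (Python) =====
-- def construct_grna_error_alignment_cache(gRNAs, gRNA_error_tolerance):
--     if gRNA_error_tolerance > 2 or gRNA_error_tolerance < 0:
--         raise ValueError(
--             "gRNA error tolerance must be 0, 1, or 2 but was "
--             + str(gRNA_error_tolerance)
--         )
--
--     cache = {}
--
--     if gRNA_error_tolerance:
--         for gRNA in gRNAs:
--             for num_substitutions in range(gRNA_error_tolerance, 0, -1):
--                 for block in _blocks(gRNA, num_substitutions):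
--                     for mutation in block:
--                         cache[mutation] = (gRNA, num_substitutions)
--
--     for gRNA in gRNAs:
--         cache[gRNA] = (gRNA, 0)
--
--     return cache
--
--
-- def _blocks(s, k):
--     # Recursion on the string itself: no index combinations, no alphabet product,
--     # no positional assignment. Returns one block per set of substituted positions
--     # (position-set blocks ordered with "substitute the first character" first),
--     # each block holding the strings at Hamming distance exactly k.
--     if k == 0:
--         return [[s]]
--     if not s:
--         return []
--     c, rest = s[0], s[1:]
--     others = [b for b in "ATCG" if b != c]
--     substituted = [[b + t for b in others for t in blk] for blk in _blocks(rest, k - 1)]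
--     kept = [[c + t for t in blk] for blk in _blocks(rest, k)]
--     return substituted + kept
-- ===== Notes on version B (the rewrite author's own statement) =====
-- stated objective: alternative
-- what changed: A enumerates itertools.combinations of positions, takes the full 4^k alphabet product, filters out tuples matching the reference base and writes each mutation by positional assignment into list(gRNA); B drops all index combinatorics and generates the mutations by a structural recursion on the string itself (at each character either keep it or prepend each of the three other bases to recursively mutated suffixes), grouped into per-position-set blocks so the dict insertion order is identical.
import Mathlib
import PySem

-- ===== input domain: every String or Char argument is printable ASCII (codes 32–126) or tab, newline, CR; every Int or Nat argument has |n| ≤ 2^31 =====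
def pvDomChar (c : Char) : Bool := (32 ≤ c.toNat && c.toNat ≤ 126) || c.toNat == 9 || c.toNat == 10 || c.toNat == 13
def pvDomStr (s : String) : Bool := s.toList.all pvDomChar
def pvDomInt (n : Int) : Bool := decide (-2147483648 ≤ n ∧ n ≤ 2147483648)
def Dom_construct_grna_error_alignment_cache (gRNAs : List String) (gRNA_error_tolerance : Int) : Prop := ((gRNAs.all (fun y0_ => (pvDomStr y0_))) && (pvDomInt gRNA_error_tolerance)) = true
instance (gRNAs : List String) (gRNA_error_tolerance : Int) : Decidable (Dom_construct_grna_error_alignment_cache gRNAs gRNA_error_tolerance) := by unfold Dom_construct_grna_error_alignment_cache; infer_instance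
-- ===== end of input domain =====

-- B replaces A's index combinatorics (itertools.combinations over positions, 4^k alphabet product
-- with a mismatch filter, positional assignment into list(gRNA)) by a structural recursion on the
-- string emitting the mutated strings directly (objective: alternative).

-- ===== PORT A =====

-- itertools.combinations(l, k) in Python's lexicographic order
def pyCombinations : Nat → List Nat → List (List Nat)
  | 0, _ => [[]]
  | _ + 1, [] => []
  | k + 1, x :: xs => ((pyCombinations k xs).map (x :: ·)) ++ pyCombinations (k + 1) xs

-- itertools.product(*lists) in Python's lexicographic order
def prodLists : List (List Char) → List (List Char)
  | [] => [[]]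
  | xs :: rest => xs.flatMap (fun x => (prodLists rest).map (x :: ·))

-- bases = list(gRNA); for i, s in zip(idxs, subs): bases[i] = s
-- (indices produced by combinations(range(len(gRNA)), k) are always in range, so plain set/getD is exact)
def applySubs (g : List Char) (idxs : List Nat) (subs : List Char) : List Char :=
  (idxs.zip subs).foldl (fun bs p => bs.set p.1 p.2) g

-- _generate_substitutions: product("ATCG", repeat=k), skip tuples matching the reference base
def genSubstitutionsA (g : List Char) (idxs : List Nat) : List String :=
  ((prodLists (List.replicate idxs.length "ATCG".toList)).filter
      (fun subs => !((idxs.zip subs).any (fun p => g.getD p.1 ' ' == p.2)))).map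
    (fun subs => String.ofList (applySubs g idxs subs))

-- _get_mutations (with _get_all_substitution_indices inlined as the combinations stream)
def getMutationsA (g : String) (k : Nat) : List String :=
  (pyCombinations k (List.range g.toList.length)).flatMap (fun idxs => genSubstitutionsA g.toList idxs)

-- the dict-comprehension + .update pairs all share one value, so they are exactly a fold of inserts
def construct_grna_error_alignment_cache (gRNAs : List String) (gRNA_error_tolerance : Int) : List (String × String × Int) :=
  if gRNA_error_tolerance > 2 ∨ gRNA_error_tolerance < 0 then []   -- Python raises ValueError; outside Pre_
  else
    let d : PySem.Dict String (String × Int) :=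
      if gRNA_error_tolerance ≠ 0 then
        gRNAs.foldl (fun d g =>
          ((PySem.List.pyRange 1 (gRNA_error_tolerance + 1) 1).reverse).foldl (fun d k =>
            (getMutationsA g k.toNat).foldl (fun d m => d.insert m (g, k)) d) d)
          PySem.Dict.empty
      else PySem.Dict.empty
    (gRNAs.foldl (fun d g => d.insert g (g, 0)) d).items

-- ===== PORT B =====

-- others = [b for b in "ATCG" if b != c]
def basesOther (c : Char) : List Char := "ATCG".toList.filter (fun b => !(b == c))

-- _blocks: recursion on the string itself; one block per set of substituted positions
def blocksB : List Char → Nat → List (List (List Char))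
  | s, 0 => [[s]]
  | [], _ + 1 => []
  | c :: rest, k + 1 =>
      ((blocksB rest k).map (fun blk => (basesOther c).flatMap (fun b => blk.map (b :: ·))))
      ++ ((blocksB rest (k + 1)).map (fun blk => blk.map (c :: ·)))

def construct_grna_error_alignment_cache_alt (gRNAs : List String) (gRNA_error_tolerance : Int) : List (String × String × Int) :=
  if gRNA_error_tolerance > 2 ∨ gRNA_error_tolerance < 0 then []   -- Python raises ValueError; outside Pre_
  else
    let d : PySem.Dict String (String × Int) :=
      if gRNA_error_tolerance ≠ 0 then
        gRNAs.foldl (fun d g =>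
          (PySem.List.pyRange gRNA_error_tolerance 0 (-1)).foldl (fun d k =>
            (blocksB g.toList k.toNat).foldl (fun d blk =>
              blk.foldl (fun d m => d.insert (String.ofList m) (g, k)) d) d) d)
          PySem.Dict.empty
      else PySem.Dict.empty
    (gRNAs.foldl (fun d g => d.insert g (g, 0)) d).items

-- ===== PRECONDITION & SPEC =====
-- Python A raises ValueError unless the tolerance is 0, 1 or 2; exactly those inputs are admitted.
def Pre_construct_grna_error_alignment_cache (gRNAs : List String) (gRNA_error_tolerance : Int) : Prop :=
  0 ≤ gRNA_error_tolerance ∧ gRNA_error_tolerance ≤ 2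
instance (gRNAs : List String) (gRNA_error_tolerance : Int) : Decidable (Pre_construct_grna_error_alignment_cache gRNAs gRNA_error_tolerance) := by unfold Pre_construct_grna_error_alignment_cache; infer_instance
def pvWitness_construct_grna_error_alignment_cache : List String × Int := (["AC", "GT"], 1)

def Spec_construct_grna_error_alignment_cache (gRNAs : List String) (gRNA_error_tolerance : Int) (out : List (String × String × Int)) : Prop := out = construct_grna_error_alignment_cache_alt gRNAs gRNA_error_tolerance
instance (gRNAs : List String) (gRNA_error_tolerance : Int) (out : List (String × String × Int)) : Decidable (Spec_construct_grna_error_alignment_cache gRNAs gRNA_error_tolerance out) := by unfold Spec_construct_grna_error_alignment_cache; infer_instance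

-- ===== CLAIM (what is proved, stated in full; the proofs are below) =====
def Claim_equal_construct_grna_error_alignment_cache : Prop := ∀ (gRNAs : List String) (gRNA_error_tolerance : Int), Dom_construct_grna_error_alignment_cache gRNAs gRNA_error_tolerance → Pre_construct_grna_error_alignment_cache gRNAs gRNA_error_tolerance → Spec_construct_grna_error_alignment_cache gRNAs gRNA_error_tolerance (construct_grna_error_alignment_cache gRNAs gRNA_error_tolerance)

-- ===== LEMMAS AND PROOFS =====

-- one block of A's stream, index-free
def blockA (s : List Char) (idxs : List Nat) : List (List Char) :=
  (prodLists (idxs.map (fun i => basesOther (s.getD i ' ')))).map (applySubs s idxs)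

lemma flatMap_if_empty {α β : Type} (c : α → Bool) (F : α → List β) (l : List α) :
    (l.flatMap (fun x => if c x then [] else F x))
      = (l.filter (fun x => !c x)).flatMap F := by
  induction l with
  | nil => rfl
  | cons x xs ih =>
    by_cases h : c x = true <;> simp [List.flatMap_cons, h, ih]

-- A's generate-and-filter over the full alphabet product equals the product of filtered alphabets
lemma prod_filter (g : List Char) (alph : List Char) (idxs : List Nat) :
    (prodLists (List.replicate idxs.length alph)).filter
        (fun subs => !((idxs.zip subs).any (fun p => g.getD p.1 ' ' == p.2)))
      = prodLists (idxs.map (fun i => alph.filter (fun b => !(b == g.getD i ' ')))) := by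
  induction idxs with
  | nil => rfl
  | cons i idxs ih =>
    simp only [List.length_cons, List.replicate_succ, prodLists, List.map_cons]
    rw [List.filter_flatMap]
    have hstep : ∀ x : Char,
        ((prodLists (List.replicate idxs.length alph)).map (x :: ·)).filter
            (fun subs => !(((i :: idxs).zip subs).any (fun p => g.getD p.1 ' ' == p.2)))
          = if (x == g.getD i ' ') then []
            else ((prodLists (List.replicate idxs.length alph)).filter
                (fun subs => !((idxs.zip subs).any (fun p => g.getD p.1 ' ' == p.2)))).map (x :: ·) := by
      intro x
      rw [List.filter_map]
      simp only [Function.comp_def, List.zip_cons_cons, List.any_cons, Bool.not_or]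
      by_cases hx : (g.getD i ' ' == x) = true
      · have hxe : x = g.getD i ' ' := (eq_of_beq hx).symm
        simp [hxe]
      · have hxe : ¬ x = g.getD i ' ' := fun h => hx (by simp [h])
        have hx' : (g.getD i ' ' == x) = false := by simpa using hx
        simp only [List.getD] at hx' hxe
        simp [hx', hxe]
    calc (alph.flatMap fun x =>
            ((prodLists (List.replicate idxs.length alph)).map (x :: ·)).filter
              (fun subs => !(((i :: idxs).zip subs).any (fun p => g.getD p.1 ' ' == p.2))))
        = alph.flatMap (fun x =>
            if (x == g.getD i ' ') then []
            else ((prodLists (List.replicate idxs.length alph)).filter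
                (fun subs => !((idxs.zip subs).any (fun p => g.getD p.1 ' ' == p.2)))).map (x :: ·)) := by
          exact List.flatMap_congr (fun x _ => hstep x)
      _ = (alph.filter (fun b => !(b == g.getD i ' '))).flatMap (fun x =>
            ((prodLists (List.replicate idxs.length alph)).filter
                (fun subs => !((idxs.zip subs).any (fun p => g.getD p.1 ' ' == p.2)))).map (x :: ·)) := by
          exact flatMap_if_empty _ _ alph
      _ = (alph.filter (fun b => !(b == g.getD i ' '))).flatMap (fun x =>
            (prodLists (idxs.map (fun i => alph.filter (fun b => !(b == g.getD i ' '))))).map (x :: ·)) := by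
          rw [ih]

lemma combos_map (f : Nat → Nat) : ∀ (k : Nat) (l : List Nat),
    pyCombinations k (l.map f) = (pyCombinations k l).map (List.map f)
  | 0, _ => by simp [pyCombinations]
  | _ + 1, [] => by simp [pyCombinations]
  | k + 1, x :: xs => by
    simp only [List.map_cons, pyCombinations, combos_map f k xs, combos_map f (k + 1) xs,
      List.map_append, List.map_map]
    rfl

lemma applySubs_shift (c : Char) (cs : List Char) (idxs : List Nat) (subs : List Char) :
    applySubs (c :: cs) (idxs.map Nat.succ) subs = c :: applySubs cs idxs subs := by
  induction idxs generalizing subs cs with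
  | nil => rfl
  | cons i idxs ih =>
    cases subs with
    | nil => rfl
    | cons b subs =>
      simp only [applySubs, List.map_cons, List.zip_cons_cons, List.foldl_cons] at *
      have hset : (c :: cs).set (Nat.succ i) b = c :: cs.set i b := rfl
      rw [hset]
      exact ih _ _

lemma applySubs_zero (c : Char) (cs : List Char) (idxs : List Nat) (b : Char) (subs : List Char) :
    applySubs (c :: cs) (0 :: idxs.map Nat.succ) (b :: subs) = b :: applySubs cs idxs subs := by
  simp only [applySubs, List.zip_cons_cons, List.foldl_cons, List.set]
  exact applySubs_shift b cs idxs subs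

lemma blockA_shift (c : Char) (cs : List Char) (idxs : List Nat) :
    blockA (c :: cs) (idxs.map Nat.succ) = (blockA cs idxs).map (c :: ·) := by
  unfold blockA
  have h1 : (idxs.map Nat.succ).map (fun i => basesOther ((c :: cs).getD i ' '))
      = idxs.map (fun i => basesOther (cs.getD i ' ')) := by
    rw [List.map_map]; rfl
  rw [h1, List.map_map]
  apply List.map_congr_left
  intro subs _
  simp [applySubs_shift]

lemma blockA_zero (c : Char) (cs : List Char) (idxs : List Nat) :
    blockA (c :: cs) (0 :: idxs.map Nat.succ)
      = (basesOther c).flatMap (fun b => (blockA cs idxs).map (b :: ·)) := by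
  unfold blockA
  have h1 : (idxs.map Nat.succ).map (fun i => basesOther ((c :: cs).getD i ' '))
      = idxs.map (fun i => basesOther (cs.getD i ' ')) := by
    rw [List.map_map]; rfl
  rw [List.map_cons, show (c :: cs).getD 0 ' ' = c from rfl]
  simp only [prodLists]
  rw [h1, List.map_flatMap]
  apply List.flatMap_congr
  intro b _
  simp only [List.map_map]
  apply List.map_congr_left
  intro subs _
  simp [applySubs_zero]

-- main bridge: B's string recursion is A's combination enumeration, block by block
lemma blocks_eq : ∀ (s : List Char) (k : Nat),
    blocksB s k = (pyCombinations k (List.range s.length)).map (blockA s) := by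
  intro s
  induction s with
  | nil =>
    intro k
    cases k with
    | zero => rfl
    | succ k => rfl
  | cons c cs ih =>
    intro k
    cases k with
    | zero =>
      simp [blocksB, pyCombinations, blockA, prodLists, applySubs]
    | succ k =>
      have hrange : List.range (c :: cs).length = 0 :: (List.range cs.length).map Nat.succ := by
        simp [List.range_succ_eq_map]
      rw [hrange]
      simp only [blocksB, pyCombinations, combos_map, List.map_append, List.map_map,
        ih k, ih (k + 1)]
      congr 1
      · apply List.map_congr_left
        intro idxs _
        simp [Function.comp_def, blockA_zero]
      · apply List.map_congr_left
        intro idxs _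
        simp [blockA_shift]

-- genSubstitutionsA, via prod_filter, is one blockA rendered to strings
lemma genA_eq (g : List Char) (idxs : List Nat) :
    genSubstitutionsA g idxs = (blockA g idxs).map String.ofList := by
  unfold genSubstitutionsA blockA
  rw [prod_filter g "ATCG".toList idxs, List.map_map]
  rfl

-- A's stream for one (gRNA, k) is exactly B's flattened blocks, rendered to strings
lemma mutations_eq (g : String) (k : Nat) :
    getMutationsA g k = ((blocksB g.toList k).flatten).map String.ofList := by
  unfold getMutationsA
  rw [blocks_eq]
  rw [List.map_flatten, List.map_map]
  rw [List.flatMap_def]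
  congr 1
  apply List.map_congr_left
  intro idxs _
  exact genA_eq g.toList idxs

-- folding A's stream of strings = B's nested fold over blocks
lemma fold_inner_eq (g : String) (k : Int) (d : PySem.Dict String (String × Int)) :
    (getMutationsA g k.toNat).foldl (fun d m => d.insert m (g, k)) d
      = (blocksB g.toList k.toNat).foldl (fun d blk =>
          blk.foldl (fun d m => d.insert (String.ofList m) (g, k)) d) d := by
  rw [mutations_eq, List.foldl_map]
  rw [← List.foldl_flatten]

-- ===== VERDICT (by name: the statement is the Claim_ definition above) =====
theorem construct_grna_error_alignment_cache_spec : Claim_equal_construct_grna_error_alignment_cache := by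
  intro gRNAs t _ hpre
  unfold Spec_construct_grna_error_alignment_cache
  unfold construct_grna_error_alignment_cache construct_grna_error_alignment_cache_alt
  obtain ⟨h0, h2⟩ := hpre
  have hif : ¬(t > 2 ∨ t < 0) := by omega
  simp only [if_neg hif]
  have hks : (PySem.List.pyRange 1 (t + 1) 1).reverse = PySem.List.pyRange t 0 (-1) := by
    have : t = 0 ∨ t = 1 ∨ t = 2 := by omega
    rcases this with h | h | h <;> subst h <;> decide
  rw [hks]
  simp only [fold_inner_eq]
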